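-- pv_equiv track=rewrite | github.com/s-morgan-jeffries/apple-mail-mcp | src/apple_mail_mcp/security.py | _is_reserved_test_domain
-- ===== SOURCE A (Python) =====
-- RESERVED_TEST_DOMAINS = {"example.com", "example.net", "example.org"}
--
-- RESERVED_TEST_TLDS = {".example", ".test", ".invalid", ".localhost"}
--
-- def _is_reserved_test_domain(email: str) -> bool:
--     """True if email's domain is an RFC 2606 reserved test domain."""
--     if "@" not in email:
--         return False
--     domain = email.rsplit("@", 1)[1].lower()
--     if domain in RESERVED_TEST_DOMAINS:
--         return True
--     for tld in RESERVED_TEST_TLDS: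
--         bare = tld.lstrip(".")
--         if domain == bare or domain.endswith(tld):
--             return True
--     return False
-- ===== SOURCE B (Python) =====
-- RESERVED_TEST_DOMAINS = {"example.com", "example.net", "example.org"}
--
-- _RESERVED_TLD_LABELS = {"example", "test", "invalid", "localhost"}
--
-- def _is_reserved_test_domain(email: str) -> bool:
--     """True if email's domain is an RFC 2606 reserved test domain."""
--     if "@" not in email:
--         return False
--     domain = email.rsplit("@", 1)[1].lower()
--     if domain in RESERVED_TEST_DOMAINS:
--         return True
--     return domain.rpartition(".")[2] in _RESERVED_TLD_LABELS
-- ===== Notes on version B (the rewrite author's own statement) =====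
-- stated objective: simpler
-- what changed: Replaces the per-TLD lstrip/equality/endswith loop by extracting the final dot-label once with rpartition and testing one membership in a bare-label set.
import Mathlib
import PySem

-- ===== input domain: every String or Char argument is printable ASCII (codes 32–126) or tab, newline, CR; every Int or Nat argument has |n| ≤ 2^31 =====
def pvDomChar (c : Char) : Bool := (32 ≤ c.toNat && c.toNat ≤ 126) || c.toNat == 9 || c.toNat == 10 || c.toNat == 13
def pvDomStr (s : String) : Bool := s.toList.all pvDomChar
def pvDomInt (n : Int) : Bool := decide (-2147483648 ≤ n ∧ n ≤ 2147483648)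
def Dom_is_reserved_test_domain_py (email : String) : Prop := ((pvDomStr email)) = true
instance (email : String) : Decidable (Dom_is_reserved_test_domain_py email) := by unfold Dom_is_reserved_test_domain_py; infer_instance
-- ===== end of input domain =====

-- B replaces A's per-TLD lstrip/equality/endswith loop by one extraction of the final
-- dot-label (rpartition) and a single membership test; objective: simpler.

-- email.rsplit("@", 1)[1] — exact whenever '@' occurs in s (guaranteed by the guard
-- under which both programs use it): the suffix after the LAST '@'.
def pvAfterLast (c : Char) (s : List Char) : List Char :=
  (s.reverse.takeWhile (fun x => x != c)).reverse

-- ===== PORT A =====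
-- RESERVED_TEST_TLDS iterated in some set order; the loop only ORs matches, so order is immaterial.
def pvTldsA : List (List Char) :=
  [".example".toList, ".test".toList, ".invalid".toList, ".localhost".toList]

-- for tld in … : bare = tld.lstrip("."); if domain == bare or domain.endswith(tld): return True
-- (lstrip(".") ported step for step as dropWhile (· == '.'); exact)
def pvLoopA (domain : List Char) : Bool :=
  pvTldsA.any (fun tld =>
    domain == tld.dropWhile (fun x => x == '.') || PySem.Chars.endswith domain tld)

def is_reserved_test_domain_py (email : String) : Bool :=
  if PySem.Str.isIn "@" email = false then false
  else
    let domain := PySem.Chars.lower (pvAfterLast '@' email.toList)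
    if (domain == "example.com".toList || domain == "example.net".toList
        || domain == "example.org".toList) then true
    else pvLoopA domain

-- ===== PORT B =====
-- domain.rpartition(".")[2] in {bare labels}: the suffix after the last '.'
-- (the whole string when there is no '.'), then one membership test.
def pvLastLabelB (domain : List Char) : Bool :=
  let last := (domain.reverse.takeWhile (fun x => x != '.')).reverse
  (last == "example".toList || last == "test".toList
    || last == "invalid".toList || last == "localhost".toList)

def is_reserved_test_domain_py_alt (email : String) : Bool :=
  if PySem.Str.isIn "@" email = false then false
  else
    let domain := PySem.Chars.lower (pvAfterLast '@' email.toList)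
    if (domain == "example.com".toList || domain == "example.net".toList
        || domain == "example.org".toList) then true
    else pvLastLabelB domain

-- ===== PRECONDITION & SPEC =====
def Spec_is_reserved_test_domain_py (email : String) (out : Bool) : Prop := out = is_reserved_test_domain_py_alt email
instance (email : String) (out : Bool) : Decidable (Spec_is_reserved_test_domain_py email out) := by unfold Spec_is_reserved_test_domain_py; infer_instance

-- ===== CLAIM (what is proved, stated in full; the proofs are below) =====
def Claim_equal_is_reserved_test_domain_py : Prop := ∀ (email : String), Dom_is_reserved_test_domain_py email → Spec_is_reserved_test_domain_py email (is_reserved_test_domain_py email)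

-- ===== LEMMAS AND PROOFS =====

-- takeWhile (≠ '.') characterised, for a target u free of dots.
theorem pv_takeWhile_eq_iff (u r : List Char) (hu : '.' ∉ u) :
    r.takeWhile (fun x => x != '.') = u ↔ (r = u ∨ (u ++ ['.']) <+: r) := by
  induction u generalizing r with
  | nil =>
      cases r with
      | nil => simp
      | cons b r' =>
          by_cases hb : b = '.'
          · subst hb; simp [List.cons_prefix_cons]
          · simp [hb, Ne.symm hb, List.cons_prefix_cons]
  | cons a u' ih =>
      have ha : a ≠ '.' := by intro h; exact hu (h ▸ List.mem_cons_self)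
      have hu' : '.' ∉ u' := fun h => hu (List.mem_cons_of_mem _ h)
      cases r with
      | nil => simp
      | cons b r' =>
          by_cases hb : b = '.'
          · subst hb
            simp [List.cons_prefix_cons, ha, Ne.symm ha]
          · simp [hb, List.cons_prefix_cons, ih r' hu',
              eq_comm (a := b) (b := a), and_or_left]

-- one TLD (Prop form): "domain == bare or domain.endswith('.'+bare)" ↔ last dot-label = bare.
theorem pv_one_tld_iff (d t : List Char) (ht : '.' ∉ t) :
    (d = t ∨ ('.' :: t) <:+ d) ↔ (d.reverse.takeWhile (fun x => x != '.')).reverse = t := by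
  have key := pv_takeWhile_eq_iff t.reverse d.reverse (by simpa using ht)
  constructor
  · rintro (rfl | hs)
    · have : d.reverse.takeWhile (fun x => x != '.') = d.reverse := by
        refine List.takeWhile_eq_self_iff.mpr ?_
        intro c hc
        have hcd : c ∈ d := List.mem_reverse.mp hc
        simp only [bne_iff_ne, ne_eq]
        rintro rfl
        exact ht hcd
      simp [this]
    · have hpre : (t.reverse ++ ['.']) <+: d.reverse := by
        have := List.reverse_prefix.mpr hs
        simpa using this
      rw [key.mpr (Or.inr hpre)]
      simp
  · intro h
    have h' : d.reverse.takeWhile (fun x => x != '.') = t.reverse := by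
      have := congrArg List.reverse h
      simpa using this
    rcases key.mp h' with h1 | h1
    · left
      have := congrArg List.reverse h1
      simpa using this
    · right
      refine List.reverse_prefix.mp ?_
      simpa using h1
-- one TLD (Bool form)
theorem pv_one_tld (d t : List Char) (ht : '.' ∉ t) :
    (d == t || PySem.Chars.endswith d ('.' :: t))
      = ((d.reverse.takeWhile (fun x => x != '.')).reverse == t) := by
  rw [Bool.eq_iff_iff]
  simp only [Bool.or_eq_true, beq_iff_eq, PySem.Chars.endswith_iff]
  exact pv_one_tld_iff d t ht

-- A's loop equals B's single last-label test.
theorem pv_main_eq (d : List Char) : pvLoopA d = pvLastLabelB d := by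
  unfold pvLoopA pvLastLabelB pvTldsA
  simp only [List.any_cons, List.any_nil, Bool.or_false]
  rw [show List.dropWhile (fun x => x == '.') ".example".toList = "example".toList from rfl,
      show List.dropWhile (fun x => x == '.') ".test".toList = "test".toList from rfl,
      show List.dropWhile (fun x => x == '.') ".invalid".toList = "invalid".toList from rfl,
      show List.dropWhile (fun x => x == '.') ".localhost".toList = "localhost".toList from rfl,
      show ".example".toList = '.' :: "example".toList from rfl,
      show ".test".toList = '.' :: "test".toList from rfl,
      show ".invalid".toList = '.' :: "invalid".toList from rfl,
      show ".localhost".toList = '.' :: "localhost".toList from rfl,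
      pv_one_tld d "example".toList (by decide), pv_one_tld d "test".toList (by decide),
      pv_one_tld d "invalid".toList (by decide), pv_one_tld d "localhost".toList (by decide)]
  simp [Bool.or_assoc]

-- ===== VERDICT (by name: the statement is the Claim_ definition above) =====
theorem is_reserved_test_domain_py_spec : Claim_equal_is_reserved_test_domain_py := by
  intro email _
  unfold Spec_is_reserved_test_domain_py is_reserved_test_domain_py is_reserved_test_domain_py_alt
  rcases h : PySem.Str.isIn "@" email with _ | _
  · simp
  · simp only [Bool.true_eq_false, if_false, pv_main_eq]
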